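-- pv_equiv track=rewrite | github.com/LimMinKyo/Programmers | Level 0/코딩 기초 트레이닝/전국 대회 선발 고사/solution.py | solution
-- ===== SOURCE A (Python) =====
-- def solution(ranks, attendances):
--     students = sorted(
--         [
--             (rank, i)
--             for i, (rank, attendance) in enumerate(zip(ranks, attendances))
--             if attendance
--         ]
--     )
--     a, b, c = map(lambda x: x[1], students[:3])
--     return 10000 * a + 100 * b + c
-- ===== SOURCE B (Python) =====
-- def solution(ranks, attendances):
--     # One pass: keep a sorted list of at most 3 best (rank, index) candidates.
--     best = []
--     for i, (rank, att) in enumerate(zip(ranks, attendances)):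
--         if att:
--             j = 0
--             while j < len(best) and best[j] < (rank, i):
--                 j += 1
--             best.insert(j, (rank, i))
--             if len(best) > 3:
--                 best.pop()
--     a, b, c = best[0][1], best[1][1], best[2][1]
--     return 10000 * a + 100 * b + c
-- ===== Notes on version B (the rewrite author's own statement) =====
-- stated objective: alternative
-- what changed: Instead of building the whole candidate list and fully sorting it, B does a single pass that maintains a kept-sorted list of at most three (rank, index) candidates (insert in position, drop the largest when it exceeds 3).
import Mathlib
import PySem

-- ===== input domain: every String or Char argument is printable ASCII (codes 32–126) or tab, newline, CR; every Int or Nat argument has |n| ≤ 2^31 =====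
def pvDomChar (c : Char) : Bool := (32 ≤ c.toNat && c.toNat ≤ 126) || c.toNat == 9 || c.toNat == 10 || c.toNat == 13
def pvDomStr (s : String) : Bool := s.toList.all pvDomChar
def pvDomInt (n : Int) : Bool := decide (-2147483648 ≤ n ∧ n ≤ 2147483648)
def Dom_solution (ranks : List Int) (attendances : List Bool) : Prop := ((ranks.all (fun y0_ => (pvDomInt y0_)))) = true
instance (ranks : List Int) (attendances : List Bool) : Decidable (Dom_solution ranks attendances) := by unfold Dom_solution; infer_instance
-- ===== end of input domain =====

-- B keeps a running top-3 candidate list in one pass instead of sorting all attendees; same result, alternative algorithm.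

-- ===== PORT A =====
-- the list comprehension over enumerate(zip(...)) with an 'if attendance' filter
def solCands (ranks : List Int) (attendances : List Bool) : List (Int × Int) :=
  (PySem.List.enumerate (ranks.zip attendances) 0).filterMap
    (fun p => if p.2.2 then some (p.2.1, p.1) else none)

def solution (ranks : List Int) (attendances : List Bool) : Int :=
  match ((PySem.List.sorted2 (solCands ranks attendances) Prod.fst Prod.snd).take 3).map Prod.snd with
  | [a, b, c] => 10000 * a + 100 * b + c
  | _ => 0    -- Python raises ValueError here (fewer than 3 attendees); excluded by Pre_

-- ===== PORT B =====
-- best[j] < (rank, i): Python tuple comparison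
def lexLt (y x : Int × Int) : Bool := y.1 < x.1 || (y.1 == x.1 && y.2 < x.2)

-- the 'while j < len(best) and best[j] < (rank, i)' scan + best.insert(j, ...)
def insB (x : Int × Int) : List (Int × Int) → List (Int × Int)
  | [] => [x]
  | y :: ys => if lexLt y x then y :: insB x ys else x :: y :: ys

-- one loop iteration of B
def stepB (best : List (Int × Int)) (p : Int × (Int × Bool)) : List (Int × Int) :=
  if p.2.2 then
    let b' := insB (p.2.1, p.1) best
    if 3 < b'.length then b'.dropLast else b'
  else best

def solution_alt (ranks : List Int) (attendances : List Bool) : Int :=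
  -- 'a, b, c = best[0][1], best[1][1], best[2][1]'
  let best := (PySem.List.enumerate (ranks.zip attendances) 0).foldl stepB []
  match PySem.List.pyGet? best 0, PySem.List.pyGet? best 1, PySem.List.pyGet? best 2 with
  | some x, some y, some z => 10000 * x.2 + 100 * y.2 + z.2
  | _, _, _ => 0    -- Python raises IndexError here (fewer than 3 attendees); excluded by Pre_

-- ===== PRECONDITION & SPEC =====
-- A raises ValueError (unpacking fewer than 3 items) when fewer than 3 attending students exist; B raises there too.
def Pre_solution (ranks : List Int) (attendances : List Bool) : Prop :=
  3 ≤ ((ranks.zip attendances).filter (fun p => p.2)).length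
instance (ranks : List Int) (attendances : List Bool) : Decidable (Pre_solution ranks attendances) := by
  unfold Pre_solution; infer_instance

def pvWitness_solution : List Int × List Bool := ([3, 1, 2], [true, true, true])

def Spec_solution (ranks : List Int) (attendances : List Bool) (out : Int) : Prop := out = solution_alt ranks attendances
instance (ranks : List Int) (attendances : List Bool) (out : Int) : Decidable (Spec_solution ranks attendances out) := by unfold Spec_solution; infer_instance

-- ===== CLAIM (what is proved, stated in full; the proofs are below) =====
def Claim_equal_solution : Prop := ∀ (ranks : List Int) (attendances : List Bool), Dom_solution ranks attendances → Pre_solution ranks attendances → Spec_solution ranks attendances (solution ranks attendances)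

-- ===== LEMMAS AND PROOFS =====

-- the comparison sorted2 uses with keys fst, snd
def befAB (a b : Int × Int) : Bool := decide (a.1 < b.1) || (!decide (b.1 < a.1) && decide (a.2 < b.2))

lemma sorted2_eq_foldl (cs : List (Int × Int)) :
    PySem.List.sorted2 cs Prod.fst Prod.snd = cs.foldl (fun acc x => PySem.List.insertBy befAB x acc) [] := by
  rfl

lemma insB_eq_insertBy (x : Int × Int) (s : List (Int × Int)) (h : ∀ y ∈ s, y.2 < x.2) :
    insB x s = PySem.List.insertBy befAB x s := by
  induction s with
  | nil => rfl
  | cons y ys ih =>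
      have hy : y.2 < x.2 := h y (by simp)
      have hb : befAB x y = !(lexLt y x) := by
        simp only [befAB, lexLt]
        by_cases h1 : x.1 < y.1 <;> by_cases h2 : y.1 < x.1 <;> by_cases h3 : y.1 = x.1 <;>
          simp_all <;> omega
      simp only [insB, PySem.List.insertBy, hb]
      rcases hl : lexLt y x with _ | _
      · simp
      · simp [ih (fun z hz => h z (by simp [hz]))]

lemma take3_insertBy (bef : Int × Int → Int × Int → Bool) (x : Int × Int) (s : List (Int × Int)) :
    (PySem.List.insertBy bef x (s.take 3)).take 3 = (PySem.List.insertBy bef x s).take 3 := by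
  match s with
  | [] => rfl
  | [a] => rfl
  | [a, b] => rfl
  | a :: b :: c :: rest =>
      simp only [List.take, PySem.List.insertBy]
      split_ifs <;> simp [*]

lemma cap_eq_take3 (z : List (Int × Int)) (h : z.length ≤ 4) :
    (if 3 < z.length then z.dropLast else z) = z.take 3 := by
  split_ifs with h3
  · have : z.length = 4 := by omega
    rw [List.dropLast_eq_take, this]
  · rw [List.take_of_length_le (by omega)]

lemma length_take3 (s : List (Int × Int)) : (s.take 3).length ≤ 3 := by
  simp [List.length_take]

lemma length_insB (x : Int × Int) (s : List (Int × Int)) : (insB x s).length = s.length + 1 := by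
  induction s with
  | nil => rfl
  | cons y ys ih => simp only [insB]; split_ifs <;> simp [ih]

-- main invariant: B's fold equals take-3 of A's sorted candidate list
lemma fold_eq_take3_sorted (es : List (Int × (Int × Bool)))
    (hp : es.Pairwise (fun p q => p.1 < q.1)) :
    es.foldl stepB [] =
      (PySem.List.sorted2 (es.filterMap (fun p => if p.2.2 then some (p.2.1, p.1) else none))
        Prod.fst Prod.snd).take 3 := by
  induction es using List.reverseRecOn with
  | nil => rfl
  | append_singleton l p ih =>
      have hpl : l.Pairwise (fun p q => p.1 < q.1) := hp.sublist (by simp)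
      have hlt : ∀ q ∈ l, q.1 < p.1 := by
        intro q hq
        exact (List.pairwise_append.mp hp).2.2 q hq p (by simp)
      rw [List.foldl_append, List.filterMap_append, ih hpl]
      simp only [List.foldl]
      set c := l.filterMap (fun p => if p.2.2 then some (p.2.1, p.1) else none) with hc
      rcases hatt : p.2.2 with _ | _
      · simp [stepB, hatt]
      · have hfm : (List.filterMap (fun p => if p.2.2 then some (p.2.1, p.1) else none) [p])
            = [(p.2.1, p.1)] := by simp [hatt]
        rw [hfm]
        have hsnd : ∀ y ∈ (PySem.List.sorted2 c Prod.fst Prod.snd).take 3, y.2 < p.1 := by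
          intro y hy
          have hy1 : y ∈ PySem.List.sorted2 c Prod.fst Prod.snd := List.mem_of_mem_take hy
          have hy2 : y ∈ c := (PySem.List.sorted2_perm c Prod.fst Prod.snd false).mem_iff.mp hy1
          rw [hc, List.mem_filterMap] at hy2
          obtain ⟨q, hq, hqe⟩ := hy2
          rcases h2 : q.2.2 with _ | _
          · simp [h2] at hqe
          · simp [h2] at hqe
            subst hqe
            simpa using hlt q hq
        have hcap : stepB ((PySem.List.sorted2 c Prod.fst Prod.snd).take 3) p
            = (PySem.List.insertBy befAB (p.2.1, p.1)
                ((PySem.List.sorted2 c Prod.fst Prod.snd).take 3)).take 3 := by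
          simp only [stepB, hatt, if_pos]
          rw [insB_eq_insertBy _ _ hsnd]
          exact cap_eq_take3 _ (by
            rw [← insB_eq_insertBy _ _ hsnd, length_insB]
            have := length_take3 (PySem.List.sorted2 c Prod.fst Prod.snd)
            omega)
        rw [hcap, take3_insertBy, sorted2_eq_foldl (c ++ [(p.2.1, p.1)]), List.foldl_append,
          ← sorted2_eq_foldl c]
        rfl

-- both unpacking matches agree on a list of length at most 3
lemma match_map_snd (s : List (Int × Int)) :
    s.length ≤ 3 →
    (match s.map Prod.snd with
     | [a, b, c] => 10000 * a + 100 * b + c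
     | _ => 0 : Int) =
    (match PySem.List.pyGet? s 0, PySem.List.pyGet? s 1, PySem.List.pyGet? s 2 with
     | some x, some y, some z => 10000 * x.2 + 100 * y.2 + z.2
     | _, _, _ => 0) := by
  intro h
  rcases s with _ | ⟨⟨x1, x2⟩, _ | ⟨⟨y1, y2⟩, _ | ⟨⟨z1, z2⟩, _ | ⟨w, t⟩⟩⟩⟩
  · rfl
  · rfl
  · rfl
  · rfl
  · exfalso; simp at h; omega

-- ===== VERDICT (by name: the statement is the Claim_ definition above) =====
theorem solution_spec : Claim_equal_solution := by
  intro ranks attendances _ _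
  unfold Spec_solution solution solution_alt
  rw [fold_eq_take3_sorted _ (PySem.List.pairwise_lt_enumerate _ _)]
  exact match_map_snd _ (List.length_take_le 3 _)
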